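-- pv_equiv track=rewrite | github.com/jiachengxiong/ReactSeq | e_smiles.py | get_bond_dic
-- ===== SOURCE A (Python) =====
-- def get_bond_dic(b_smiles,detailed_smiles):
--     b_smiles = b_smiles.replace('-]',']')
--     detailed_smiles = detailed_smiles.replace('-]',']')
--     count = 0
--     bond_dic = {}
--     for i,j in zip(detailed_smiles,b_smiles):
--         if i != j:
--             bond_dic[count] = j
--
--         if i in ['-','=','#',':']:
--             count += 1
--     return bond_dic
-- ===== SOURCE B (Python) =====
-- def get_bond_dic(b_smiles, detailed_smiles):
--     b = b_smiles.replace('-]', ']')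
--     d = detailed_smiles.replace('-]', ']')
--     n = min(len(d), len(b))
--     # For each mismatch position k, its key is the number of bond characters
--     # strictly before k in d; no running counter is carried at all.
--     return {sum(d.count(c, 0, k) for c in '-=#:'): b[k]
--             for k in range(n) if d[k] != b[k]}
-- ===== Notes on version B (the rewrite author's own statement) =====
-- stated objective: alternative
-- what changed: B eliminates A's stateful running bond counter entirely: it loops over index positions k of the zipped prefix and, only at mismatch positions, recomputes the key as the count of bond characters in the prefix d[:k] via str.count.
import Mathlib
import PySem

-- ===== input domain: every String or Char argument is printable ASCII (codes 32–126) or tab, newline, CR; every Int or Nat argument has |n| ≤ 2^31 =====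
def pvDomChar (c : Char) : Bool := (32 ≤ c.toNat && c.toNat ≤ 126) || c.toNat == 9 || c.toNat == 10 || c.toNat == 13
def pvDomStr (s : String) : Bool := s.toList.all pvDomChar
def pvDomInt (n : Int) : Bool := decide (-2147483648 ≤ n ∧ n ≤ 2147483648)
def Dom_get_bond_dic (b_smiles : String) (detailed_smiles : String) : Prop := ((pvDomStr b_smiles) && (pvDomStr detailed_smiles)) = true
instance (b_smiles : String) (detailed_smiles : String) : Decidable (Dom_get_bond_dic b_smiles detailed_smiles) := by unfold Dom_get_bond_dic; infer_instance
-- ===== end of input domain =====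

-- B drops A's running bond counter altogether: it loops over index positions and, at each
-- mismatch, recomputes the key as the number of bond characters in the prefix d[:k]
-- (objective: alternative; different algorithm, not faster).

-- ===== PORT A =====
-- literal transliteration of A: one fold over zip(detailed, base) carrying (count, dict)
def get_bond_dic (b_smiles : String) (detailed_smiles : String) : List (Int × String) :=
  let b := PySem.Str.replace b_smiles "-]" "]"
  let d := PySem.Str.replace detailed_smiles "-]" "]"
  (((d.toList.zip b.toList).foldl
    (fun (st : Int × PySem.Dict Int String) ij =>
      let st1 := if ij.1 ≠ ij.2 then (st.1, st.2.insert st.1 (String.ofList [ij.2])) else st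
      if ij.1 ∈ ['-', '=', '#', ':'] then (st1.1 + 1, st1.2) else st1)
    (0, PySem.Dict.empty)).2).items

-- ===== PORT B =====
-- literal transliteration of B: loop over k in range(min(len(d), len(b))); at a mismatch the
-- key is sum(d.count(c, 0, k) for c in '-=#:'), ported as counts on d.toList.take k.toNat
-- (exact: 0 ≤ k < len(d)); d[k] / b[k] are in range, so getD-style indexing is exact too.
def get_bond_dic_alt (b_smiles : String) (detailed_smiles : String) : List (Int × String) :=
  let b := PySem.Str.replace b_smiles "-]" "]"
  let d := PySem.Str.replace detailed_smiles "-]" "]"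
  let db := d.toList
  let bb := b.toList
  let n : Int := min (db.length : Int) (bb.length : Int)
  ((PySem.List.pyRange 0 n 1).foldl
    (fun (dic : PySem.Dict Int String) k =>
      if PySem.List.pyGetD db k ' ' ≠ PySem.List.pyGetD bb k ' ' then
        dic.insert ((['-', '=', '#', ':'].map
            (fun c => ((db.take k.toNat).count c : Int))).sum)
          (String.ofList [PySem.List.pyGetD bb k ' '])
      else dic)
    PySem.Dict.empty).items

-- ===== PRECONDITION & SPEC =====
def Spec_get_bond_dic (b_smiles : String) (detailed_smiles : String) (out : List (Int × String)) : Prop := out = get_bond_dic_alt b_smiles detailed_smiles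
instance (b_smiles : String) (detailed_smiles : String) (out : List (Int × String)) : Decidable (Spec_get_bond_dic b_smiles detailed_smiles out) := by unfold Spec_get_bond_dic; infer_instance

-- ===== CLAIM (what is proved, stated in full; the proofs are below) =====
def Claim_equal_get_bond_dic : Prop := ∀ (b_smiles : String) (detailed_smiles : String), Dom_get_bond_dic b_smiles detailed_smiles → Spec_get_bond_dic b_smiles detailed_smiles (get_bond_dic b_smiles detailed_smiles)

-- ===== LEMMAS AND PROOFS =====

-- A's loop body, named for the proofs
def pvStep (st : Int × PySem.Dict Int String) (ij : Char × Char) : Int × PySem.Dict Int String :=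
  let st1 := if ij.1 ≠ ij.2 then (st.1, st.2.insert st.1 (String.ofList [ij.2])) else st
  if ij.1 ∈ ['-', '=', '#', ':'] then (st1.1 + 1, st1.2) else st1

lemma pvStep_snd (st : Int × PySem.Dict Int String) (ij : Char × Char) :
    (pvStep st ij).2 = if ij.1 ≠ ij.2 then st.2.insert st.1 (String.ofList [ij.2]) else st.2 := by
  unfold pvStep; split_ifs <;> rfl

-- B's key at position k, named for the proofs
def pvBondCnt (l : List Char) : Int :=
  (['-', '=', '#', ':'].map (fun c => ((l.count c) : Int))).sum

lemma pvBondCnt_cons (ch : Char) (l : List Char) :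
    pvBondCnt (ch :: l) = (if ch ∈ ['-', '=', '#', ':'] then 1 else 0) + pvBondCnt l := by
  by_cases h1 : ch = '-' <;> by_cases h2 : ch = '=' <;> by_cases h3 : ch = '#' <;>
    by_cases h4 : ch = ':' <;>
    simp_all [pvBondCnt, List.count_cons] <;> omega

-- invariant: A's running counter is its start plus the bond count of the consumed detailed chars
lemma pvCount_inv (zs : List (Char × Char)) (c : Int) (dic : PySem.Dict Int String) :
    (zs.foldl pvStep (c, dic)).1 = c + pvBondCnt (zs.map Prod.fst) := by
  induction zs generalizing c dic with
  | nil => simp [pvBondCnt]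
  | cons z t ih =>
    simp only [List.foldl_cons, List.map_cons, pvBondCnt_cons, pvStep]
    split_ifs <;> simp [ih] <;> ring

lemma pv_map_fst_take_zip (l1 l2 : List Char) (m : Nat) (h1 : m ≤ l1.length) (h2 : m ≤ l2.length) :
    ((l1.zip l2).take m).map Prod.fst = l1.take m := by
  induction m generalizing l1 l2 with
  | zero => simp
  | succ k ih =>
    cases l1 with
    | nil => simp at h1
    | cons a t1 =>
      cases l2 with
      | nil => simp at h2
      | cons b t2 => simp_all [List.take_succ_cons]

-- main bridge: B's indexed fold over range n equals A's fold over the first n zipped pairs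
lemma pv_main (ds bs : List Char) (n : Nat) (hd : n ≤ ds.length) (hb : n ≤ bs.length) :
    (List.range n).foldl
      (fun (dic : PySem.Dict Int String) k =>
        if ds.getD k ' ' ≠ bs.getD k ' ' then
          dic.insert (pvBondCnt (ds.take k)) (String.ofList [bs.getD k ' '])
        else dic)
      PySem.Dict.empty
    = (((ds.zip bs).take n).foldl pvStep (0, PySem.Dict.empty)).2 := by
  induction n with
  | zero => simp
  | succ m ih =>
    have hdm : m < ds.length := by omega
    have hbm : m < bs.length := by omega
    have hzm : m < (ds.zip bs).length := by simp [List.length_zip]; omega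
    rw [List.range_succ, List.foldl_append,
        List.take_succ, List.foldl_append, ih (by omega) (by omega)]
    have hz : (ds.zip bs)[m]? = some (ds[m], bs[m]) := by
      rw [List.getElem?_eq_getElem hzm]
      simp [List.getElem_zip]
    rw [hz]
    have h1 : ds.getD m ' ' = ds[m] := by
      simp [List.getD_eq_getElem?_getD, List.getElem?_eq_getElem hdm]
    have h2 : bs.getD m ' ' = bs[m] := by
      simp [List.getD_eq_getElem?_getD, List.getElem?_eq_getElem hbm]
    have hcnt : (((ds.zip bs).take m).foldl pvStep
        ((0 : Int), PySem.Dict.empty (κ := Int) (ν := String))).1 = pvBondCnt (ds.take m) := by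
      rw [pvCount_inv, pv_map_fst_take_zip ds bs m (by omega) (by omega)]
      ring
    simp only [Option.toList_some, List.foldl_cons, List.foldl_nil, pvStep_snd, h1, h2, ← hcnt]

theorem pv_ports_eq (b_smiles detailed_smiles : String) :
    get_bond_dic b_smiles detailed_smiles = get_bond_dic_alt b_smiles detailed_smiles := by
  show (((PySem.Str.replace detailed_smiles "-]" "]").toList.zip
          (PySem.Str.replace b_smiles "-]" "]").toList).foldl pvStep
          (0, PySem.Dict.empty)).2.items
      = ((PySem.List.pyRange 0
            (min ((PySem.Str.replace detailed_smiles "-]" "]").toList.length : Int)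
                 ((PySem.Str.replace b_smiles "-]" "]").toList.length : Int)) 1).foldl
          (fun (dic : PySem.Dict Int String) k =>
            if PySem.List.pyGetD (PySem.Str.replace detailed_smiles "-]" "]").toList k ' '
                ≠ PySem.List.pyGetD (PySem.Str.replace b_smiles "-]" "]").toList k ' ' then
              dic.insert ((['-', '=', '#', ':'].map
                  (fun c => (((PySem.Str.replace detailed_smiles "-]" "]").toList.take k.toNat).count c : Int))).sum)
                (String.ofList [PySem.List.pyGetD (PySem.Str.replace b_smiles "-]" "]").toList k ' '])
            else dic)
          PySem.Dict.empty).items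
  set db := (PySem.Str.replace detailed_smiles "-]" "]").toList with hdb
  set bb := (PySem.Str.replace b_smiles "-]" "]").toList with hbb
  set n : Nat := min db.length bb.length with hn
  have hmin : min ((db.length : Int)) ((bb.length : Int)) = (n : Int) := by omega
  rw [hmin, PySem.List.pyRange_one]
  have hnn : (((n : Nat) : Int) - 0).toNat = n := by omega
  rw [hnn, List.foldl_map]
  have hbody : (fun (dic : PySem.Dict Int String) (k : Nat) =>
      if PySem.List.pyGetD db (0 + (k : Int)) ' ' ≠ PySem.List.pyGetD bb (0 + (k : Int)) ' ' then
        dic.insert ((['-', '=', '#', ':'].map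
            (fun c => ((db.take (0 + (k : Int)).toNat).count c : Int))).sum)
          (String.ofList [PySem.List.pyGetD bb (0 + (k : Int)) ' '])
      else dic)
      = (fun (dic : PySem.Dict Int String) (k : Nat) =>
        if db.getD k ' ' ≠ bb.getD k ' ' then
          dic.insert (pvBondCnt (db.take k)) (String.ofList [bb.getD k ' '])
        else dic) := by
    funext dic k
    simp [PySem.List.pyGetD_natCast, pvBondCnt]
  rw [hbody, pv_main db bb n (by omega) (by omega)]
  have ht : (db.zip bb).take n = db.zip bb := by
    apply List.take_of_length_le; simp [List.length_zip, hn]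
  rw [ht]

-- ===== VERDICT (by name: the statement is the Claim_ definition above) =====
theorem get_bond_dic_spec : Claim_equal_get_bond_dic := by
  intro b_smiles detailed_smiles _
  unfold Spec_get_bond_dic
  exact pv_ports_eq b_smiles detailed_smiles
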